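-- pv_equiv track=rewrite | github.com/EnAnsari/algorithm-hsu | src/1402-1/practices/2/question-4/greedy.py | greedy_assignment
-- ===== SOURCE A (Python) =====
-- def min(list, validation):
--     indexes = [index for index, is_true in enumerate(validation) if is_true] # filtered indexes
--     if not indexes:
--         return None
--     min_index = indexes[0]
--
--     for i in indexes[1:]:
--         if list[min_index] > list[i]:
--             min_index = i
--     return min_index
--
-- def greedy_assignment(cost_matrix, n):
--     assignments = []
--     temp = [True] * n
--     for person in range(n):
--         min_index = min(cost_matrix[person], temp)
--         assignments.append(min_index)
--         temp[min_index] = False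
--
--     return assignments
-- ===== SOURCE B (Python) =====
-- def greedy_assignment(cost_matrix, n):
--     assignments = []
--     temp = [True] * n
--     for person in range(n):
--         row = cost_matrix[person]
--         order = sorted(range(n), key=lambda c: (row[c], c))
--         for c in order:
--             if temp[c]:
--                 assignments.append(c)
--                 temp[c] = False
--                 break
--     return assignments
-- ===== Notes on version B (the rewrite author's own statement) =====
-- stated objective: alternative
-- what changed: Per person, B stably sorts the columns by (cost, index) and picks the first still-available one, instead of A's first-minimum scan of the row over the availability mask via a filtered index list.
-- outside the precondition, e.g. on greedy_assignment([[]], 1): A returns [0], B raises IndexError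
import Mathlib
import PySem

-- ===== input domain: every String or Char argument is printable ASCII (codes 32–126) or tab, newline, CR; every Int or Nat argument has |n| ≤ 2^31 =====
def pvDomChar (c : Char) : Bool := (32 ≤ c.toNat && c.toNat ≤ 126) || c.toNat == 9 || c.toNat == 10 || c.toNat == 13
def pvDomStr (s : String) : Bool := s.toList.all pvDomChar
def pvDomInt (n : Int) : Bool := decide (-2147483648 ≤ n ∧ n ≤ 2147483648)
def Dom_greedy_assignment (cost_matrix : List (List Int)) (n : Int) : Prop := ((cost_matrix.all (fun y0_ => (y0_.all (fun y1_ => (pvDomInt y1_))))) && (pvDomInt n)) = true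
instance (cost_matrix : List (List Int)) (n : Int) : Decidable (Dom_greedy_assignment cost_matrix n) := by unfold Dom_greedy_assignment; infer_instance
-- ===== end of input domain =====

-- B replaces A's per-person first-minimum scan over the availability mask by a stable
-- sort of the columns by (cost, index) followed by taking the first still-available
-- column (objective: alternative decomposition, not claimed faster).

-- ===== PORT A =====
-- Python helper `min(list, validation)`; list[...] is pyGetD (in range under Pre_).
def pymin (lst : List Int) (validation : List Bool) : Option Int :=
  let indexes : List Int :=
    (PySem.List.enumerate validation).filterMap (fun p => if p.2 then some p.1 else none)
  match indexes with
  | [] => none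
  | m :: rest =>
    some (rest.foldl
      (fun mi i => if PySem.List.pyGetD lst mi 0 > PySem.List.pyGetD lst i 0 then i else mi) m)

def greedy_assignment (cost_matrix : List (List Int)) (n : Int) : List Int :=
  ((PySem.List.pyRange 0 n 1).foldl
    (fun (st : List Int × List Bool) person =>
      match pymin (PySem.List.pyGetD cost_matrix person []) st.2 with
      | some j => (st.1 ++ [j], PySem.List.pySetD st.2 j false)
      -- `min` returned None: Python raises TypeError at temp[None]; outside Pre_
      | none => (st.1 ++ [0], st.2))
    ([], List.replicate n.toNat true)).1

-- ===== PORT B =====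
def greedy_assignment_alt (cost_matrix : List (List Int)) (n : Int) : List Int :=
  ((PySem.List.pyRange 0 n 1).foldl
    (fun (st : List Int × List Bool) person =>
      let row := PySem.List.pyGetD cost_matrix person []
      let order := PySem.List.sorted (PySem.List.pyRange 0 n 1)
        (fun c => toLex (PySem.List.pyGetD row c 0, c)) false
      -- `for c in order: if temp[c]: … break` = first element of order with temp[c]
      match order.find? (fun c => PySem.List.pyGetD st.2 c false) with
      | some c => (st.1 ++ [c], PySem.List.pySetD st.2 c false)
      | none => st)
    ([], List.replicate n.toNat true)).1

-- ===== PRECONDITION & SPEC =====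
-- Pre_ excludes the inputs where Python A raises (n exceeding the number of rows, or a row
-- too short for an index A compares); among these, when only one candidate column is left A
-- happens to return its index without ever reading the too-short row — an artefact of its
-- scan that B's sort (which evaluates row[c] for every column) cannot reproduce.
def Pre_greedy_assignment (cost_matrix : List (List Int)) (n : Int) : Prop :=
  n ≤ (cost_matrix.length : Int) ∧
  ∀ row ∈ cost_matrix.take n.toNat, n ≤ (row.length : Int)
instance (cost_matrix : List (List Int)) (n : Int) : Decidable (Pre_greedy_assignment cost_matrix n) := by
  unfold Pre_greedy_assignment; infer_instance

def pvWitness_greedy_assignment : List (List Int) × Int := ([[2, 1, 3], [1, 1, 0], [5, 4, 4]], 3)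

def Spec_greedy_assignment (cost_matrix : List (List Int)) (n : Int) (out : List Int) : Prop := out = greedy_assignment_alt cost_matrix n
instance (cost_matrix : List (List Int)) (n : Int) (out : List Int) : Decidable (Spec_greedy_assignment cost_matrix n out) := by unfold Spec_greedy_assignment; infer_instance

-- ===== CLAIM (what is proved, stated in full; the proofs are below) =====
def Claim_equal_greedy_assignment : Prop := ∀ (cost_matrix : List (List Int)) (n : Int), Dom_greedy_assignment cost_matrix n → Pre_greedy_assignment cost_matrix n → Spec_greedy_assignment cost_matrix n (greedy_assignment cost_matrix n)

-- ===== LEMMAS AND PROOFS =====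

-- the lexicographic comparison (cost first, then index) both programs effectively minimise
def lexle (row : List Int) (a b : Int) : Prop :=
  PySem.List.pyGetD row a 0 < PySem.List.pyGetD row b 0 ∨
    (PySem.List.pyGetD row a 0 = PySem.List.pyGetD row b 0 ∧ a ≤ b)

def availP (temp : List Bool) (i : Int) : Prop :=
  0 ≤ i ∧ i < (temp.length : Int) ∧ PySem.List.pyGetD temp i false = true

-- A's filtered index list: membership and sortedness
theorem mem_indexes (temp : List Bool) (i : Int) :
    i ∈ (PySem.List.enumerate temp).filterMap (fun p => if p.2 then some p.1 else none) ↔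
      availP temp i := by
  simp only [List.mem_filterMap, PySem.List.mem_enumerate_iff, availP]
  constructor
  · rintro ⟨p, ⟨k, hk, rfl⟩, hp⟩
    by_cases h : temp[k] = true
    · simp only [h, if_pos, zero_add] at hp
      cases hp
      refine ⟨by omega, by exact_mod_cast hk, ?_⟩
      simp [List.getD, hk, h]
    · simp [eq_false_of_ne_true h] at hp
  · rintro ⟨h0, hlt, hget⟩
    obtain ⟨k, rfl⟩ : ∃ k : ℕ, i = (k : Int) := ⟨i.toNat, by omega⟩
    have hk : k < temp.length := by exact_mod_cast hlt
    have h : temp[k] = true := by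
      simpa [List.getD, hk] using hget
    exact ⟨((k : Int), temp[k]), ⟨k, hk, by simp⟩, by simp [h]⟩

theorem pairwise_indexes (temp : List Bool) :
    ((PySem.List.enumerate temp).filterMap
      (fun p => if p.2 then some p.1 else none)).Pairwise (· < ·) := by
  rw [List.pairwise_filterMap]
  refine (PySem.List.pairwise_lt_enumerate temp 0).imp ?_
  intro a b hab x hx y hy
  split_ifs at hx hy; simp_all

-- A's fold computes a lex-minimum of m :: l (indices ascending)
theorem foldA_spec (row : List Int) :
    ∀ (l : List Int) (m : Int), (∀ i ∈ l, m < i) → l.Pairwise (· < ·) →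
      (l.foldl (fun mi i => if PySem.List.pyGetD row mi 0 > PySem.List.pyGetD row i 0 then i else mi) m) ∈ m :: l ∧
      ∀ i ∈ m :: l, lexle row
        (l.foldl (fun mi i => if PySem.List.pyGetD row mi 0 > PySem.List.pyGetD row i 0 then i else mi) m) i := by
  intro l
  induction l with
  | nil =>
    intro m _ _
    refine ⟨List.mem_cons_self, ?_⟩
    intro i hi
    rcases List.mem_cons.mp hi with rfl | hi'
    · exact Or.inr ⟨rfl, le_refl i⟩
    · simp at hi'
  | cons a t ih =>
    intro m hm hp
    obtain ⟨hpa, hpt⟩ := List.pairwise_cons.mp hp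
    have hma : m < a := hm a List.mem_cons_self
    simp only [List.foldl_cons]
    by_cases h : PySem.List.pyGetD row m 0 > PySem.List.pyGetD row a 0
    · rw [if_pos h]
      obtain ⟨hmem, hmin⟩ := ih a hpa hpt
      refine ⟨List.mem_cons_of_mem m hmem, ?_⟩
      intro x hx
      rcases List.mem_cons.mp hx with rfl | hx'
      · have h1 := hmin a List.mem_cons_self
        unfold lexle at h1 ⊢
        omega
      · exact hmin x hx'
    · rw [if_neg h]
      obtain ⟨hmem, hmin⟩ := ih m (fun i hi => hm i (List.mem_cons_of_mem a hi)) hpt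
      refine ⟨?_, ?_⟩
      · rcases List.mem_cons.mp hmem with h' | h'
        · exact List.mem_cons.mpr (Or.inl h')
        · exact List.mem_cons_of_mem m (List.mem_cons_of_mem a h')
      · intro x hx
        rcases List.mem_cons.mp hx with h' | hx'
        · rw [h']; exact hmin m List.mem_cons_self
        rcases List.mem_cons.mp hx' with h' | hx''
        · rw [h']
          have h1 := hmin m List.mem_cons_self
          unfold lexle at h1 ⊢
          omega
        · exact hmin x (List.mem_cons_of_mem m hx'')

-- find? on a lex-strictly-sorted list returns a lex-minimum among matches
theorem findB_spec (row : List Int) (p : Int → Bool) :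
    ∀ (S : List Int), S.Pairwise (fun a b => lexle row a b ∧ a ≠ b) →
      ∀ c, S.find? p = some c → c ∈ S ∧ p c = true ∧ ∀ i ∈ S, p i = true → lexle row c i := by
  intro S
  induction S with
  | nil => intro _ c h; simp at h
  | cons a t ih =>
    intro hp c hfind
    obtain ⟨hpa, hpt⟩ := List.pairwise_cons.mp hp
    by_cases h : p a = true
    · rw [List.find?_cons_of_pos h] at hfind
      cases hfind
      refine ⟨List.mem_cons_self, h, ?_⟩
      intro i hi _
      rcases List.mem_cons.mp hi with rfl | hi'
      · exact Or.inr ⟨rfl, le_refl i⟩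
      · exact (hpa i hi').1
    · rw [List.find?_cons_of_neg h] at hfind
      obtain ⟨hc, hpc, hmin⟩ := ih hpt c hfind
      refine ⟨List.mem_cons_of_mem a hc, hpc, ?_⟩
      intro i hi hpi
      rcases List.mem_cons.mp hi with rfl | hi'
      · exact absurd hpi h
      · exact hmin i hi' hpi

-- the sorted column order is strictly increasing in (cost, index)
theorem sorted_order_pairwise (row : List Int) (n : Int) :
    (PySem.List.sorted (PySem.List.pyRange 0 n 1)
      (fun c => toLex (PySem.List.pyGetD row c 0, c)) false).Pairwise
        (fun a b => lexle row a b ∧ a ≠ b) := by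
  have hperm := PySem.List.sorted_perm (xs := PySem.List.pyRange 0 n 1)
    (key := fun c => toLex (PySem.List.pyGetD row c 0, c)) (rev := false)
  have hnd : (PySem.List.sorted (PySem.List.pyRange 0 n 1)
      (fun c => toLex (PySem.List.pyGetD row c 0, c)) false).Nodup :=
    hperm.symm.nodup (PySem.List.nodup_pyRange_one 0 n)
  have hle := PySem.List.sorted_pairwise (xs := PySem.List.pyRange 0 n 1)
    (key := fun c => toLex (PySem.List.pyGetD row c 0, c))
  refine (List.pairwise_and_iff.mpr ⟨hle, hnd⟩).imp ?_
  rintro a b ⟨hk, hne⟩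
  refine ⟨?_, hne⟩
  rw [Prod.Lex.le_iff] at hk
  unfold lexle
  rcases hk with h | ⟨h1, h2⟩
  · exact Or.inl h
  · exact Or.inr ⟨h1, h2⟩

theorem lexle_antisymm (row : List Int) {a b : Int} (h1 : lexle row a b) (h2 : lexle row b a) : a = b := by
  unfold lexle at *; omega

theorem countP_set_false :
    ∀ (l : List Bool) (k : Nat), k < l.length → l.getD k false = true →
      (l.set k false).countP (· = true) + 1 = l.countP (· = true) := by
  intro l
  induction l with
  | nil => intro k h; simp at h
  | cons a t ih =>
    intro k hk hget
    cases k with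
    | zero =>
      have ha : a = true := by simpa [List.getD] using hget
      subst ha
      simp
    | succ k =>
      simp only [List.getD, List.getElem?_cons_succ] at hget
      have := ih k (by simpa using hk) (by simpa [List.getD] using hget)
      simp only [List.set_cons_succ, List.countP_cons]
      omega

-- the heart: on a temp with an available column, both per-person choices agree
theorem step_eq (row : List Int) (temp : List Bool) (n : Int)
    (hlen : temp.length = n.toNat) (hex : ∃ i, availP temp i) :
    ∃ j : Int, pymin row temp = some j ∧
      (PySem.List.sorted (PySem.List.pyRange 0 n 1)
        (fun c => toLex (PySem.List.pyGetD row c 0, c)) false).find?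
          (fun c => PySem.List.pyGetD temp c false) = some j ∧
      availP temp j := by
  obtain ⟨i0, hi0⟩ := hex
  obtain ⟨h00, h01, h02⟩ := hi0
  have hcast : (temp.length : Int) = (n.toNat : Int) := by exact_mod_cast congrArg Nat.cast hlen
  have hn : 0 < n := by omega
  have hlenn : (temp.length : Int) = n := by omega
  have hAVmem := mem_indexes temp
  have hAVp := pairwise_indexes temp
  have hi0AV : i0 ∈ (PySem.List.enumerate temp).filterMap
      (fun p => if p.2 then some p.1 else none) := (hAVmem i0).mpr ⟨h00, h01, h02⟩
  cases hAV : (PySem.List.enumerate temp).filterMap (fun p => if p.2 then some p.1 else none) with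
  | nil => rw [hAV] at hi0AV; simp at hi0AV
  | cons m rest =>
    rw [hAV] at hAVp
    obtain ⟨hpm, hpt⟩ := List.pairwise_cons.mp hAVp
    obtain ⟨hmemA, hminA⟩ := foldA_spec row rest m hpm hpt
    have hA : pymin row temp =
        some (rest.foldl (fun mi i =>
          if PySem.List.pyGetD row mi 0 > PySem.List.pyGetD row i 0 then i else mi) m) := by
      simp only [pymin, hAV]
    set j := rest.foldl (fun mi i =>
      if PySem.List.pyGetD row mi 0 > PySem.List.pyGetD row i 0 then i else mi) m with hj
    have hjav : availP temp j := (hAVmem j).mp (by rw [hAV]; exact hmemA)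
    have hjmin : ∀ i, availP temp i → lexle row j i := by
      intro i hi
      exact hminA i (by rw [← hAV]; exact (hAVmem i).mpr hi)
    -- B side
    have hSp := sorted_order_pairwise row n
    have hmemS : ∀ x : Int, x ∈ PySem.List.sorted (PySem.List.pyRange 0 n 1)
        (fun c => toLex (PySem.List.pyGetD row c 0, c)) false ↔ 0 ≤ x ∧ x < n := by
      intro x
      rw [PySem.List.mem_sorted, PySem.List.mem_pyRange_one]
    have hsome : ∃ c, (PySem.List.sorted (PySem.List.pyRange 0 n 1)
        (fun c => toLex (PySem.List.pyGetD row c 0, c)) false).find?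
          (fun c => PySem.List.pyGetD temp c false) = some c := by
      rw [← Option.isSome_iff_exists, List.find?_isSome]
      exact ⟨i0, (hmemS i0).mpr ⟨h00, by omega⟩, h02⟩
    obtain ⟨c, hc⟩ := hsome
    obtain ⟨hcS, hcp, hcmin⟩ := findB_spec row _ _ hSp c hc
    have hcav : availP temp c := ⟨((hmemS c).mp hcS).1, by rw [hlenn]; exact ((hmemS c).mp hcS).2, hcp⟩
    have hjc : j = c := by
      refine lexle_antisymm row (hjmin c hcav) (hcmin j ?_ hjav.2.2)
      exact (hmemS j).mpr ⟨hjav.1, by have := hjav.2.1; omega⟩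
    exact ⟨j, hA, by rw [hjc]; exact hc, hjav⟩

-- the loop invariant: equal states, temp of length n with n-p available columns
theorem loop_eq (cost_matrix : List (List Int)) (n : Int) :
    ∀ (k : Nat) (p : Int) (acc : List Int) (temp : List Bool),
      0 ≤ p → p ≤ n → (n - p).toNat = k → temp.length = n.toNat →
      temp.countP (· = true) = (n - p).toNat →
      ((PySem.List.pyRange p n 1).foldl
        (fun (st : List Int × List Bool) person =>
          match pymin (PySem.List.pyGetD cost_matrix person []) st.2 with
          | some j => (st.1 ++ [j], PySem.List.pySetD st.2 j false)
          | none => (st.1 ++ [0], st.2)) (acc, temp)) =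
      ((PySem.List.pyRange p n 1).foldl
        (fun (st : List Int × List Bool) person =>
          let row := PySem.List.pyGetD cost_matrix person []
          let order := PySem.List.sorted (PySem.List.pyRange 0 n 1)
            (fun c => toLex (PySem.List.pyGetD row c 0, c)) false
          match order.find? (fun c => PySem.List.pyGetD st.2 c false) with
          | some c => (st.1 ++ [c], PySem.List.pySetD st.2 c false)
          | none => st) (acc, temp)) := by
  intro k
  induction k with
  | zero =>
    intro p acc temp _ _ hk _ _
    rw [PySem.List.pyRange_one_eq_nil (by omega)]
    rfl
  | succ k ih =>
    intro p acc temp h0 hpn hk hlen hcnt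
    have hplt : p < n := by omega
    rw [PySem.List.pyRange_one_cons hplt]
    simp only [List.foldl_cons]
    have hex : ∃ i, availP temp i := by
      have hpos : 0 < temp.countP (· = true) := by omega
      rw [List.countP_pos_iff] at hpos
      obtain ⟨b, hb, hbt⟩ := hpos
      obtain ⟨idx, hidx, rfl⟩ := List.mem_iff_getElem.mp hb
      refine ⟨(idx : Int), by omega, by exact_mod_cast hidx, ?_⟩
      simp only [PySem.List.pyGetD_natCast]
      simp only [List.getD, List.getElem?_eq_getElem hidx, Option.getD_some]
      simpa using hbt
    obtain ⟨j, hA, hB, hjav⟩ := step_eq (PySem.List.pyGetD cost_matrix p []) temp n hlen hex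
    obtain ⟨hj0, hjlt, hjget⟩ := hjav
    obtain ⟨jk, rfl⟩ : ∃ m : ℕ, j = (m : Int) := ⟨j.toNat, by omega⟩
    have hjk : jk < temp.length := by exact_mod_cast hjlt
    have hset : PySem.List.pySetD temp (jk : Int) false = temp.set jk false := by
      simp
    have hgetn : temp.getD jk false = true := by
      simpa using hjget
    simp only [hA, hB]
    refine ih (p + 1) (acc ++ [(jk : Int)]) (PySem.List.pySetD temp (jk : Int) false)
      (by omega) (by omega) (by omega) ?_ ?_
    · rw [hset]; simp [hlen]
    · rw [hset]
      have hc := countP_set_false temp jk hjk hgetn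
      omega

-- ===== VERDICT (by name: the statement is the Claim_ definition above) =====
theorem greedy_assignment_spec : Claim_equal_greedy_assignment := by
  intro cost_matrix n _ _
  unfold Spec_greedy_assignment greedy_assignment greedy_assignment_alt
  by_cases hn : 0 ≤ n
  · rw [loop_eq cost_matrix n n.toNat 0 [] (List.replicate n.toNat true) le_rfl hn
      (by omega) (by simp) (by simp [List.countP_replicate])]
  · rw [PySem.List.pyRange_one_eq_nil (by omega)]
    rfl
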